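-- pv_equiv track=rewrite | github.com/20130353/Leetcode | target_offer/数字题/聪明的编辑.py | solution
-- ===== SOURCE A (Python) =====
-- def solution(string):
--     if len(set(string)) == 1:
--         return string[:2]
--     i = 0
--     while i < len(string):
--         key = string[i:i + 4]
--         if len(key) >= 3 and key[0] == key[1] and key[1] == key[2]:
--             string = string[:i] + string[i + 1:]
--             continue
--         if len(key) == 4 and key[0] == key[1] and key[2] == key[3]:
--             string = string[:i + 3] + string[i + 4:]
--             continue
--         i += 1
--     return string
-- ===== SOURCE B (Python) =====
-- def solution(string):
--     out = []
--     for ch in string: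
--         if len(out) >= 2 and out[-1] == out[-2] == ch:
--             continue  # would form a triple
--         if len(out) >= 3 and out[-1] == ch and out[-2] == out[-3]:
--             continue  # would form an AABB pair
--         out.append(ch)
--     return ''.join(out)
-- ===== Notes on version B (the rewrite author's own statement) =====
-- stated objective: faster
-- what changed: Replaced the rescanning while-loop that rebuilds the string by slicing on every deletion with a single left-to-right pass over the characters that appends to an output list and skips a character when it would complete a triple or an AABB pair at the tail.
import Mathlib
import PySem

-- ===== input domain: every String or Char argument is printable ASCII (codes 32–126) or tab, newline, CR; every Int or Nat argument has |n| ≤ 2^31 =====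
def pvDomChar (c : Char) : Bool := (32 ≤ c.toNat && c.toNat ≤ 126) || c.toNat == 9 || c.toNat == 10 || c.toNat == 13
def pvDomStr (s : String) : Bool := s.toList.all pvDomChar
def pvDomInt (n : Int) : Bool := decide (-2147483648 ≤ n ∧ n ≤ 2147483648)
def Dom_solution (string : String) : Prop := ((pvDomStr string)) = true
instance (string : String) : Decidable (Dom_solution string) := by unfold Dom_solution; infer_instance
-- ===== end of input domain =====

-- B replaces A's rescanning while-loop (which rebuilds the string by slicing on every deletion)
-- with a single left-to-right pass appending to an output list: an asymptotically faster algorithm.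

-- ===== PORT A =====
-- the while loop: state is the current string s and the index i (fuel only makes the
-- structural recursion evident; 2*len(s) steps always suffice, see solLoop_eq_fA)
def solLoop (fuel : Nat) (s : List Char) (i : Nat) : List Char :=
  match fuel with
  | 0 => s
  | fuel + 1 =>
    if i < s.length then
      let key := PySem.List.slice s (some (i:Int)) (some ((i:Int)+4))   -- string[i:i+4]
      if 3 ≤ key.length ∧ key.getD 0 ' ' = key.getD 1 ' ' ∧ key.getD 1 ' ' = key.getD 2 ' ' then
        -- string = string[:i] + string[i+1:]
        solLoop fuel (PySem.List.slice s none (some (i:Int)) ++ PySem.List.slice s (some ((i:Int)+1)) none) i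
      else if key.length = 4 ∧ key.getD 0 ' ' = key.getD 1 ' ' ∧ key.getD 2 ' ' = key.getD 3 ' ' then
        -- string = string[:i+3] + string[i+4:]
        solLoop fuel (PySem.List.slice s none (some ((i:Int)+3)) ++ PySem.List.slice s (some ((i:Int)+4)) none) i
      else solLoop fuel s (i+1)
    else s

def solution (string : String) : String :=
  if PySem.Set.len (PySem.Set.ofList string.toList) = 1 then
    String.ofList (PySem.List.slice string.toList none (some 2))   -- string[:2]
  else
    String.ofList (solLoop (2 * string.toList.length) string.toList 0)

-- ===== PORT B =====
-- the accumulator is kept head-first (cons = Python's append at the end); join reverses it back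
def altStep (out : List Char) (ch : Char) : List Char :=
  if 2 ≤ out.length ∧ out.getD 0 ' ' = out.getD 1 ' ' ∧ out.getD 1 ' ' = ch then out
  else if 3 ≤ out.length ∧ out.getD 0 ' ' = ch ∧ out.getD 1 ' ' = out.getD 2 ' ' then out
  else ch :: out

def solution_alt (string : String) : String :=
  String.ofList ((string.toList.foldl altStep []).reverse)

-- ===== PRECONDITION & SPEC =====
def Spec_solution (string : String) (out : String) : Prop := out = solution_alt string
instance (string : String) (out : String) : Decidable (Spec_solution string out) := by unfold Spec_solution; infer_instance

-- ===== CLAIM (what is proved, stated in full; the proofs are below) =====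
def Claim_equal_solution : Prop := ∀ (string : String), Dom_solution string → Spec_solution string (solution string)

-- ===== LEMMAS AND PROOFS =====

-- A's rewriting, seen on the suffix alone (A's window string[i:i+4] never looks left of i)
def fA : List Char → List Char
  | a :: b :: c :: rest =>
    if a = b ∧ b = c then fA (b :: c :: rest)
    else
      match rest with
      | d :: rest2 => if a = b ∧ c = d then fA (a :: b :: c :: rest2) else a :: fA (b :: c :: d :: rest2)
      | [] => [a, b, c]
  | l => l
termination_by l => l.length
decreasing_by all_goals simp

theorem fA_nil : fA [] = [] := by simp [fA]

-- fA emits the head when neither rule fires at the front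
theorem fA_emit (a : Char) (t2 : List Char)
    (h1 : ¬(3 ≤ ((a :: t2).take 4).length ∧ ((a :: t2).take 4).getD 0 ' ' = ((a :: t2).take 4).getD 1 ' ' ∧
      ((a :: t2).take 4).getD 1 ' ' = ((a :: t2).take 4).getD 2 ' '))
    (h2 : ¬(((a :: t2).take 4).length = 4 ∧ ((a :: t2).take 4).getD 0 ' ' = ((a :: t2).take 4).getD 1 ' ' ∧
      ((a :: t2).take 4).getD 2 ' ' = ((a :: t2).take 4).getD 3 ' ')) :
    fA (a :: t2) = a :: fA t2 := by
  match t2 with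
  | [] => simp [fA]
  | [b] => simp [fA]
  | b :: c :: rest =>
    have hnt : ¬(a = b ∧ b = c) := by
      intro hbc
      refine h1 ⟨?_, ?_, ?_⟩ <;> simp [hbc.1, hbc.2]
    match rest with
    | [] =>
      rw [fA.eq_def]
      simp only [if_neg hnt]
      rw [show fA [b, c] = [b, c] by simp [fA]]
    | d :: rest2 =>
      have hnp : ¬(a = b ∧ c = d) := by
        intro hp
        refine h2 ⟨by simp, ?_, ?_⟩ <;> simp [hp.1, hp.2]
      rw [fA.eq_def]
      simp only [if_neg hnt]
      rw [if_neg hnp]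

-- the loop only rewrites the suffix from i on, and 2*|s| steps of fuel always suffice
theorem solLoop_eq_fA : ∀ (fuel : Nat) (s : List Char) (i : Nat), 2 * s.length - i ≤ fuel →
    solLoop fuel s i = s.take i ++ fA (s.drop i) := by
    intro fuel
    induction fuel with
    | zero =>
      intro s i hf
      have _hi : ¬ i < s.length := by omega
      rw [show solLoop 0 s i = s from rfl, List.take_of_length_le (by omega),
        List.drop_eq_nil_of_le (by omega), fA_nil, List.append_nil]
    | succ n ihf =>
      intro s i hf
      by_cases hi : i < s.length
      · rw [solLoop]
        rw [if_pos hi]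
        have hkey : PySem.List.slice s (some (i:Int)) (some ((i:Int)+4)) = (s.drop i).take 4 := by
          rw [show ((i:Int)+4) = (((i+4:Nat)):Int) by push_cast; ring, PySem.List.slice_natCast]
          congr 1; omega
        have hs1 : PySem.List.slice s none (some (i:Int)) = s.take i :=
          PySem.List.slice_to_natCast s i
        have hs2 : PySem.List.slice s (some ((i:Int)+1)) none = s.drop (i+1) := by
          rw [show ((i:Int)+1) = (((i+1:Nat)):Int) by push_cast; ring,
            PySem.List.slice_from_natCast]
        have hs3 : PySem.List.slice s none (some ((i:Int)+3)) = s.take (i+3) := by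
          rw [show ((i:Int)+3) = (((i+3:Nat)):Int) by push_cast; ring,
            PySem.List.slice_to_natCast]
        have hs4 : PySem.List.slice s (some ((i:Int)+4)) none = s.drop (i+4) := by
          rw [show ((i:Int)+4) = (((i+4:Nat)):Int) by push_cast; ring,
            PySem.List.slice_from_natCast]
        simp only [hkey, hs1, hs2, hs3, hs4]
        by_cases hc1 : 3 ≤ ((s.drop i).take 4).length ∧
            ((s.drop i).take 4).getD 0 ' ' = ((s.drop i).take 4).getD 1 ' ' ∧
            ((s.drop i).take 4).getD 1 ' ' = ((s.drop i).take 4).getD 2 ' '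
        · rw [if_pos hc1]
          have h3 : 3 ≤ (s.drop i).length := by
            have := hc1.1; rw [List.length_take] at this; omega
          obtain ⟨a, b, c, rest, ht⟩ : ∃ a b c rest, s.drop i = a :: b :: c :: rest := by
            match hdrop : s.drop i, h3 with
            | [], h => simp at h
            | [a], h => simp at h
            | [a, b], h => simp at h
            | a :: b :: c :: rest, _ => exact ⟨a, b, c, rest, rfl⟩
          have hab : a = b := by
            have := hc1.2.1; rw [ht] at this; simpa using this
          have hbc : b = c := by
            have := hc1.2.2; rw [ht] at this; simpa using this
          rw [ihf (s.take i ++ s.drop (i+1)) i (by simp; omega)]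
          have e1 : (s.take i ++ s.drop (i+1)).take i = s.take i := by
            rw [List.take_append_of_le_length (by simp; omega), List.take_take]
            simp
          have e2 : (s.take i ++ s.drop (i+1)).drop i = s.drop (i+1) := by
            rw [List.drop_append, List.drop_eq_nil_of_le (by rw [List.length_take]; omega),
              List.length_take, Nat.min_eq_left (by omega), Nat.sub_self, List.drop_zero,
              List.nil_append]
          have e3 : fA (s.drop i) = fA (s.drop (i+1)) := by
            rw [← List.tail_drop, ht, List.tail_cons, fA.eq_def]
            simp only []
            rw [if_pos (show a = b ∧ b = c from ⟨hab, hbc⟩)]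
          rw [e1, e2, e3]
        · rw [if_neg hc1]
          by_cases hc2 : ((s.drop i).take 4).length = 4 ∧
              ((s.drop i).take 4).getD 0 ' ' = ((s.drop i).take 4).getD 1 ' ' ∧
              ((s.drop i).take 4).getD 2 ' ' = ((s.drop i).take 4).getD 3 ' '
          · rw [if_pos hc2]
            have h4 : 4 ≤ (s.drop i).length := by
              have := hc2.1; rw [List.length_take] at this; omega
            obtain ⟨a, b, c, d, rest2, ht⟩ : ∃ a b c d rest2, s.drop i = a :: b :: c :: d :: rest2 := by
              match hdrop : s.drop i, h4 with
              | [], h => simp at h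
              | [a], h => simp at h
              | [a, b], h => simp at h
              | [a, b, c], h => simp at h
              | a :: b :: c :: d :: rest2, _ => exact ⟨a, b, c, d, rest2, rfl⟩
            have hab : a = b := by
              have := hc2.2.1; rw [ht] at this; simpa using this
            have hcd : c = d := by
              have := hc2.2.2; rw [ht] at this; simpa using this
            have hlen : i + 4 ≤ s.length := by
              have := congrArg List.length ht; simp at this; omega
            rw [ihf (s.take (i+3) ++ s.drop (i+4)) i
              (by rw [List.length_append, List.length_take, List.length_drop]; omega)]
            have e1 : (s.take (i+3) ++ s.drop (i+4)).take i = s.take i := by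
              rw [List.take_append_of_le_length (by simp; omega), List.take_take]
              simp
            have e2 : (s.take (i+3) ++ s.drop (i+4)).drop i = a :: b :: c :: rest2 := by
              rw [List.drop_append, List.drop_take, List.length_take,
                Nat.min_eq_left (by omega), show i + 3 - i = 3 by omega,
                Nat.sub_eq_zero_of_le (by omega), List.drop_zero, ht]
              have hrest : s.drop (i+4) = rest2 := by
                rw [← List.drop_drop, ht]
                rfl
              rw [hrest]
              simp
            have e3 : fA (s.drop i) = fA (a :: b :: c :: rest2) := by
              rw [ht, fA.eq_def]
              simp only []
              rw [if_neg (by rw [ht] at hc1; intro hx; exact hc1 ⟨by simp, by simpa using hx.1, by simpa using hx.2⟩)]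
              rw [if_pos ⟨hab, hcd⟩]
            rw [e1, e2, e3]
          · rw [if_neg hc2]
            rw [ihf s (i+1) (by omega)]
            obtain ⟨a, t2, ht⟩ : ∃ a t2, s.drop i = a :: t2 := by
              match hdrop : s.drop i, (by rw [List.length_drop]; omega : 1 ≤ (s.drop i).length) with
              | [], h => simp at h
              | a :: t2, _ => exact ⟨a, t2, rfl⟩
            have hga : s[i]? = some a := by
              rw [← List.head?_drop, ht]; rfl
            rw [List.take_add_one, hga]
            have htail : s.drop (i+1) = t2 := by
              rw [← List.tail_drop, ht]; rfl
            rw [htail]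
            have := fA_emit a t2 (by rw [← ht]; exact hc1) (by rw [← ht]; exact hc2)
            rw [ht, this]
            simp
      · rw [solLoop, if_neg hi, List.take_of_length_le (by omega),
          List.drop_eq_nil_of_le (by omega), fA_nil, List.append_nil]

-- altStep push/skip shapes
theorem altStep_nil (c : Char) : altStep [] c = [c] := by
  simp [altStep]

theorem altStep_push (x c : Char) (out : List Char) (h : x ≠ c) :
    altStep (x :: out) c = c :: x :: out := by
  unfold altStep
  rw [if_neg, if_neg]
  · rintro ⟨-, h2, -⟩; simp at h2; exact h h2
  · rintro ⟨-, h2, h3⟩; simp at h2 h3; exact h (h2.trans h3)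

theorem altStep_push2 (a : Char) (out : List Char)
    (h : out = [] ∨ ∃ x out2, out = x :: out2 ∧ x ≠ a ∧ (out2 = [] ∨ ∃ y out3, out2 = y :: out3 ∧ x ≠ y)) :
    altStep (a :: out) a = a :: a :: out := by
  rcases h with rfl | ⟨x, out2, rfl, hxa, h2⟩
  · unfold altStep; rw [if_neg, if_neg] <;> simp
  · unfold altStep
    rw [if_neg, if_neg]
    · rcases h2 with rfl | ⟨y, out3, rfl, hxy⟩
      · rintro ⟨h3, -⟩; simp at h3
      · rintro ⟨-, -, h3⟩; simp at h3; exact hxy h3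
    · rintro ⟨-, h2', -⟩; simp at h2'; exact hxa h2'.symm

theorem altStep_skip_triple (a : Char) (out : List Char) :
    altStep (a :: a :: out) a = a :: a :: out := by
  unfold altStep; rw [if_pos]; simp

theorem altStep_skip_aabb (d a : Char) (out : List Char) :
    altStep (d :: a :: a :: out) d = d :: a :: a :: out := by
  by_cases hd : d = a
  · subst hd; unfold altStep; rw [if_pos]; simp
  · unfold altStep
    rw [if_neg, if_pos]
    · exact ⟨by simp, by simp, by simp⟩
    · rintro ⟨-, h2, -⟩; simp at h2; exact hd h2

theorem foldl_skip_run (a : Char) (out t : List Char) (m : Nat) :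
    List.foldl altStep (a :: a :: out) (List.replicate m a ++ t) =
      List.foldl altStep (a :: a :: out) t := by
  induction m with
  | zero => rfl
  | succ m ih => simp only [List.replicate_succ, List.cons_append, List.foldl_cons,
      altStep_skip_triple]; exact ih

theorem foldl_skip_aabb (d a : Char) (out t : List Char) (m : Nat) :
    List.foldl altStep (d :: a :: a :: out) (List.replicate m d ++ t) =
      List.foldl altStep (d :: a :: a :: out) t := by
  induction m with
  | zero => rfl
  | succ m ih => simp only [List.replicate_succ, List.cons_append, List.foldl_cons,
      altStep_skip_aabb]; exact ih

-- fA emits the first char when no rule can fire at the front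
theorem fA_cons_of_ne (a : Char) (t : List Char) (h : t.head? ≠ some a) :
    fA (a :: t) = a :: fA t := by
  match t with
  | [] => simp [fA]
  | [b] => simp [fA]
  | b :: c :: rest =>
    have hba : a ≠ b := by simp at h; exact fun e => h e.symm
    match rest with
    | [] => simp [fA, hba]
    | d :: rest2 => simp [fA, hba]

-- a leading run of length ≥ 2 collapses to length 2
theorem fA_run (a : Char) (k : Nat) (t : List Char) (h : 2 ≤ k) :
    fA (List.replicate k a ++ t) = fA (a :: a :: t) := by
  induction k with
  | zero => omega
  | succ k ih =>
    rcases Nat.lt_or_ge k 2 with hk | hk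
    · interval_cases k
      · omega
      · rfl
    · have h3 : 3 ≤ k + 1 := by omega
      rw [show (k+1) = (k-2)+3 by omega]
      simp only [List.replicate_succ, List.cons_append]
      rw [show fA (a :: a :: a :: (List.replicate (k-2) a ++ t)) = fA (a :: a :: (List.replicate (k-2) a ++ t)) by
        rw [fA.eq_def]; simp]
      have := ih (by omega)
      rw [show k = (k-2)+2 by omega] at this
      simpa [List.replicate_succ] using this

-- after a double, the following run collapses to a single char
theorem fA_aabb (a d : Char) (m : Nat) (u : List Char) (hda : d ≠ a) (hm : 1 ≤ m)
    (hu : u.head? ≠ some d) :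
    fA (a :: a :: (List.replicate m d ++ u)) = a :: a :: fA (d :: u) := by
  have had : a ≠ d := fun h => hda h.symm
  induction m with
  | zero => omega
  | succ m ih =>
    rcases Nat.eq_zero_or_pos m with rfl | hm'
    · -- run of exactly one d
      simp only [List.replicate_succ, List.replicate_zero, List.cons_append, List.nil_append]
      match u, hu with
      | [], _ =>
        rw [fA.eq_def]; simp [had, fA]
      | e :: u2, hu =>
        have hde : d ≠ e := fun h => hu (by simp [h.symm])
        rw [fA.eq_def]
        simp only []
        rw [if_neg (by rintro ⟨-, h2⟩; exact had h2)]
        rw [if_neg (by rintro ⟨-, h2⟩; exact hde h2)]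
        rw [fA_cons_of_ne a (d :: e :: u2) (by simp; exact hda)]
    · -- AABB fires: drop the fourth character
      have step : fA (a :: a :: (List.replicate (m+1) d ++ u)) =
          fA (a :: a :: (List.replicate m d ++ u)) := by
        rw [show List.replicate (m+1) d = d :: d :: List.replicate (m-1) d by
            rw [← List.replicate_succ, ← List.replicate_succ]; congr 1; omega]
        rw [show List.replicate m d = d :: List.replicate (m-1) d by
            rw [← List.replicate_succ]; congr 1; omega]
        simp only [List.cons_append]
        rw [fA.eq_def]
        simp only []
        rw [if_neg (by rintro ⟨-, h2⟩; exact had h2), if_pos (by simp)]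
      rw [step, ih hm']

-- maximal-run decomposition of a nonempty list
theorem run_decomp (t : List Char) (a : Char) :
    ∃ k t', a :: t = List.replicate (k+1) a ++ t' ∧ t'.head? ≠ some a := by
  induction t generalizing a with
  | nil => exact ⟨0, [], by simp⟩
  | cons b t2 ih =>
    by_cases hb : b = a
    · subst hb
      obtain ⟨k, t', h1, h2⟩ := ih b
      exact ⟨k+1, t', by rw [List.replicate_succ, List.cons_append, ← h1], h2⟩
    · exact ⟨0, b :: t2, by simp, by simp [hb]⟩

-- the boundary invariant between B's accumulator and the rest of the input:
-- the accumulator's top differs from the next input char, and if the accumulator's top two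
-- chars are equal, the input's leading run has length exactly 1
def BInv (out t : List Char) : Prop :=
  (∀ a, t.head? = some a → out.head? ≠ some a) ∧
  (∀ a x y, t.head? = some a → out.head? = some x → out.tail.head? = some y → x = y →
    t.tail.head? ≠ some a)

theorem main_lemma : ∀ (n : Nat) (t out : List Char), t.length ≤ n → BInv out t →
    List.foldl altStep out t = (fA t).reverse ++ out := by
  intro n
  induction n with
  | zero =>
    intro t out ht _
    have : t = [] := List.eq_nil_of_length_eq_zero (by omega)
    subst this; simp [fA_nil]
  | succ n ih =>
    intro t out ht hinv
    match t, ht, hinv with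
    | [], _, _ => simp [fA_nil]
    | a :: t2, ht, hinv =>
      obtain ⟨k, t', hdec, hhd⟩ := run_decomp t2 a
      have hlen : t2.length = k + t'.length := by
        have := congrArg List.length hdec; simp at this; omega
      have hpush1 : altStep out a = a :: out := by
        match out with
        | [] => exact altStep_nil a
        | x :: out2 => exact altStep_push x a out2 (by
            intro hxa
            exact hinv.1 a rfl (by simp [hxa]))
      cases k with
      | zero =>
        have ht2 : t2 = t' := by simpa using hdec
        subst ht2
        rw [List.foldl_cons, hpush1, ih t2 (a :: out) (by simp at ht; omega) ?_,
          fA_cons_of_ne a t2 hhd]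
        · simp
        · constructor
          · intro b hb
            simp only [List.head?_cons, ne_eq, Option.some.injEq]
            intro hab
            exact hhd (by rw [hb, hab])
          · intro b x y hb hx hy hxy
            simp only [List.head?_cons, Option.some.injEq] at hx
            subst hx
            simp only [List.tail_cons] at hy
            rw [← hxy] at hy
            exact (hinv.1 a rfl hy).elim
      | succ k' =>
        have ht2 : t2 = List.replicate (k'+1) a ++ t' := by
          have := hdec; rw [List.replicate_succ] at this; simpa using this
        have ht2h : t2.head? = some a := by rw [ht2]; simp [List.replicate_succ]
        have hnotdbl : out = [] ∨ ∃ x out2, out = x :: out2 ∧ x ≠ a ∧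
            (out2 = [] ∨ ∃ y out3, out2 = y :: out3 ∧ x ≠ y) := by
          match out with
          | [] => exact Or.inl rfl
          | [x] =>
            refine Or.inr ⟨x, [], rfl, ?_, Or.inl rfl⟩
            intro hxa; exact hinv.1 a rfl (by simp [hxa])
          | x :: y :: out3 =>
            refine Or.inr ⟨x, y :: out3, rfl, ?_, Or.inr ⟨y, out3, rfl, ?_⟩⟩
            · intro hxa; exact hinv.1 a rfl (by simp [hxa])
            · intro hxy; exact hinv.2 a x y rfl rfl rfl hxy ht2h
        have hpush2 : altStep (a :: out) a = a :: a :: out := altStep_push2 a out hnotdbl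
        have hsplit : a :: t2 = a :: a :: (List.replicate k' a ++ t') := by
          rw [ht2, List.replicate_succ]; rfl
        rw [hsplit, List.foldl_cons, List.foldl_cons, hpush1, hpush2, foldl_skip_run a out t' k']
        cases t' with
        | nil =>
          rw [show a :: a :: (List.replicate k' a ++ ([]:List Char)) =
              List.replicate (k'+2) a ++ [] by simp [List.replicate_succ]]
          rw [fA_run a (k'+2) [] (by omega)]
          have h2 : fA [a, a] = [a, a] := by simp [fA]
          simp [h2]
        | cons d u2 =>
          have hda : d ≠ a := by simpa using hhd
          obtain ⟨m, u', hdec2, hhd2⟩ := run_decomp u2 d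
          have hu2 : d :: u2 = d :: (List.replicate m d ++ u') := by
            have := hdec2; rw [List.replicate_succ] at this; simpa using this
          have hpd : altStep (a :: a :: out) d = d :: a :: a :: out :=
            altStep_push a d (a :: out) (fun h => hda h.symm)
          rw [hu2, List.foldl_cons, hpd, foldl_skip_aabb d a out u' m]
          have hulen : u'.length + 1 ≤ n := by
            have h5 := congrArg List.length hdec2; simp at h5
            simp at ht hlen; omega
          rw [ih u' (d :: a :: a :: out) (by omega) ?_]
          · have hfa : fA (a :: a :: (List.replicate k' a ++ (d :: (List.replicate m d ++ u')))) =
                a :: a :: d :: fA u' := by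
              rw [show a :: a :: (List.replicate k' a ++ (d :: (List.replicate m d ++ u'))) =
                  List.replicate (k'+2) a ++ (List.replicate (m+1) d ++ u') by
                    simp [List.replicate_succ]]
              rw [fA_run a (k'+2) _ (by omega),
                fA_aabb a d (m+1) u' hda (by omega) hhd2,
                fA_cons_of_ne d u' hhd2]
            rw [hfa]; simp
          · constructor
            · intro b hb
              simp only [List.head?_cons, ne_eq, Option.some.injEq]
              intro hdb
              exact hhd2 (by rw [hb, hdb])
            · intro b x y hb hx hy hxy
              simp only [List.head?_cons, Option.some.injEq, List.tail_cons] at hx hy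
              exact absurd (hx.trans (hxy.trans hy.symm)) hda

-- the uniform fast path: B on a constant string gives its first two characters
theorem foldl_uniform (a : Char) (k : Nat) (h : 1 ≤ k) :
    (List.foldl altStep [] (List.replicate k a)).reverse = (List.replicate k a).take 2 := by
  match k, h with
  | 1, _ => simp [altStep_nil]
  | (k+2), _ =>
    rw [show List.replicate (k+2) a = a :: a :: (List.replicate k a ++ []) by
      simp [List.replicate_succ]]
    simp only [List.foldl_cons, altStep_nil, altStep_push2 a [] (Or.inl rfl), foldl_skip_run]
    simp [List.take_replicate]

-- a singleton set means a nonempty constant list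
theorem set_card_one (l : List Char) (h : PySem.Set.len (PySem.Set.ofList l) = 1) :
    ∃ a k, l = List.replicate (k+1) a := by
  have hlen : (PySem.Set.ofList l).length = 1 := by
    unfold PySem.Set.len at h; exact_mod_cast h
  obtain ⟨e, he⟩ := List.length_eq_one_iff.mp hlen
  have hmem : ∀ x ∈ l, x = e := by
    intro x hx
    have := (PySem.Set.mem_ofList l x).mpr hx
    rw [he] at this; simpa using this
  have hne : l ≠ [] := by
    intro h0; subst h0
    simp [PySem.Set.ofList] at he
  refine ⟨e, l.length - 1, ?_⟩
  have hrep := List.eq_replicate_of_mem hmem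
  rw [hrep]; congr 1
  cases l with
  | nil => exact absurd rfl hne
  | cons x xs => simp

-- ===== VERDICT (by name: the statement is the Claim_ definition above) =====
theorem solution_spec : Claim_equal_solution := by
  intro s _
  unfold Spec_solution solution solution_alt
  by_cases h1 : PySem.Set.len (PySem.Set.ofList s.toList) = 1
  · obtain ⟨a, k, hl⟩ := set_card_one s.toList h1
    rw [if_pos h1, hl, show ((2:Int)) = (((2:Nat)):Int) by norm_num,
      PySem.List.slice_to_natCast _ 2, foldl_uniform a (k+1) (by omega)]
  · rw [if_neg h1, solLoop_eq_fA (2 * s.toList.length) s.toList 0 (by omega), main_lemma (s.toList.length) s.toList [] le_rfl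
      ⟨fun _ _ => by simp, fun _ _ _ _ hx => by simp at hx⟩]
    simp
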